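-- pv_equiv track=rewrite | github.com/XyzHuy/-DL-Fine-tuning-coding-model | data/solution/Solution2178.py | maximumEvenSplit
-- ===== SOURCE A (Python) =====
-- from typing import List
--
-- def maximumEvenSplit(finalSum: int) -> List[int]:
--     if finalSum % 2 != 0:
--         return []  # If finalSum is odd, it cannot be split into even integers
--
--     result = []
--     current_even = 2
--
--     while finalSum >= current_even:
--         result.append(current_even)
--         finalSum -= current_even
--         current_even += 2
--
--     # If there's any remaining sum, add it to the last element
--     if finalSum > 0:
--         result[-1] += finalSum
--
--     return result
-- ===== SOURCE B (Python) =====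
-- from typing import List
--
-- def maximumEvenSplit(finalSum: int) -> List[int]:
--     if finalSum % 2 != 0 or finalSum < 2:
--         return []
--     # binary search for the largest m with m*(m+1) <= finalSum
--     lo, hi = 1, finalSum
--     while lo < hi:
--         mid = (lo + hi + 1) // 2
--         if mid * (mid + 1) <= finalSum:
--             lo = mid
--         else:
--             hi = mid - 1
--     m = lo
--     return [2 * i for i in range(1, m)] + [finalSum - m * (m - 1)]
-- ===== Notes on version B (the rewrite author's own statement) =====
-- stated objective: alternative
-- what changed: A's subtract-2,4,6,... accumulation loop is replaced by a binary search for the number m of parts (largest m with m*(m+1) <= finalSum) followed by direct construction of [2,4,...,2(m-1)] plus a closed-form last element finalSum - m*(m-1).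
import Mathlib
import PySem

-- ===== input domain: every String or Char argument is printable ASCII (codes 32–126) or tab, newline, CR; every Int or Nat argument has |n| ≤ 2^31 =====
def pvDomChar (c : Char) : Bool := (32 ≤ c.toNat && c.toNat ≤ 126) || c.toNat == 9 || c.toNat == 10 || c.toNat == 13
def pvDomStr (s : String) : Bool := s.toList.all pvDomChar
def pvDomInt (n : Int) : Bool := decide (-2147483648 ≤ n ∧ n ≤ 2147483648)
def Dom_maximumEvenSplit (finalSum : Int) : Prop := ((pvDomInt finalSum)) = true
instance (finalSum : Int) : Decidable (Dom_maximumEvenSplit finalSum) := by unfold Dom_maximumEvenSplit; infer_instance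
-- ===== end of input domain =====

-- B replaces A's subtract-2,4,6,… loop by a binary search for the number m of parts followed by
-- direct construction of the list (objective: alternative).

-- ===== PORT A =====
-- midpoint bound used by PORT B's termination proof (cited by name in decreasing_by)
theorem pvMid_bounds (lo hi : Int) (h : lo < hi) :
    lo < PySem.Int.floordiv (lo + hi + 1) 2 ∧ PySem.Int.floordiv (lo + hi + 1) 2 ≤ hi := by
  rw [PySem.Int.floordiv_eq_ediv_of_pos (by omega)]; omega

-- A's while loop: current_even is encoded as 2*(k+1) for a Nat counter k (k = number of
-- appended elements so far); returns (appended list, remaining finalSum).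
def pvLoopA (s : Int) (k : Nat) : List Int × Int :=
  if h : 2 * ((k : Int) + 1) ≤ s then
    let r := pvLoopA (s - 2 * ((k : Int) + 1)) (k + 1)
    ((2 * ((k : Int) + 1)) :: r.1, r.2)
  else ([], s)
termination_by s.toNat
decreasing_by omega

-- result[-1] += rem  (Python raises IndexError on []; that branch is unreachable in A since a
-- positive even remainder below 2 is impossible, so the [] case here is arbitrary)
def pvBumpLast : List Int → Int → List Int
  | [], _ => []
  | [x], r => [x + r]
  | x :: y :: xs, r => x :: pvBumpLast (y :: xs) r

def maximumEvenSplit (finalSum : Int) : List Int :=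
  if PySem.Int.mod finalSum 2 ≠ 0 then []
  else
    let p := pvLoopA finalSum 0
    if p.2 > 0 then pvBumpLast p.1 p.2 else p.1

-- ===== PORT B =====
-- while lo < hi: mid = (lo+hi+1)//2 …  (binary search for the largest m with m*(m+1) ≤ finalSum)
def pvBsearch (finalSum lo hi : Int) : Int :=
  if h : lo < hi then
    let mid := PySem.Int.floordiv (lo + hi + 1) 2
    if mid * (mid + 1) ≤ finalSum then pvBsearch finalSum mid hi
    else pvBsearch finalSum lo (mid - 1)
  else lo
termination_by (hi - lo).toNat
decreasing_by
  · have := pvMid_bounds lo hi h; omega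
  · have := pvMid_bounds lo hi h; omega

def maximumEvenSplit_alt (finalSum : Int) : List Int :=
  if PySem.Int.mod finalSum 2 ≠ 0 ∨ finalSum < 2 then []
  else
    let m := pvBsearch finalSum 1 finalSum
    ((PySem.List.pyRange 1 m 1).map (fun i => 2 * i)) ++ [finalSum - m * (m - 1)]

-- ===== PRECONDITION & SPEC =====
def Spec_maximumEvenSplit (finalSum : Int) (out : List Int) : Prop := out = maximumEvenSplit_alt finalSum
instance (finalSum : Int) (out : List Int) : Decidable (Spec_maximumEvenSplit finalSum out) := by unfold Spec_maximumEvenSplit; infer_instance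

-- ===== CLAIM (what is proved, stated in full; the proofs are below) =====
def Claim_equal_maximumEvenSplit : Prop := ∀ (finalSum : Int), Dom_maximumEvenSplit finalSum → Spec_maximumEvenSplit finalSum (maximumEvenSplit finalSum)

-- ===== LEMMAS AND PROOFS =====

-- binary-search invariant: from a bracket [lo, hi] with lo good and hi+1 bad, pvBsearch
-- returns the largest m with m*(m+1) ≤ finalSum.
theorem pvBsearch_spec (finalSum lo hi : Int)
    (hle : lo ≤ hi) (hlo : lo * (lo + 1) ≤ finalSum) (hhi : finalSum < (hi + 1) * (hi + 2)) :
    lo ≤ pvBsearch finalSum lo hi ∧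
    pvBsearch finalSum lo hi * (pvBsearch finalSum lo hi + 1) ≤ finalSum ∧
    finalSum < (pvBsearch finalSum lo hi + 1) * (pvBsearch finalSum lo hi + 2) := by
  fun_induction pvBsearch finalSum lo hi with
  | case1 lo hi h mid hmid ih =>
      have hb : lo < mid ∧ mid ≤ hi := pvMid_bounds lo hi h
      have := ih hb.2 hmid hhi
      exact ⟨le_trans (le_of_lt hb.1) this.1, this.2⟩
  | case2 lo hi h mid hmid ih =>
      have hb : lo < mid ∧ mid ≤ hi := pvMid_bounds lo hi h
      have hhi' : finalSum < (mid - 1 + 1) * (mid - 1 + 2) := by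
        have : finalSum < mid * (mid + 1) := lt_of_not_ge hmid
        nlinarith
      exact ih (by omega) hlo hhi'
  | case3 lo hi h =>
      have : lo = hi := le_antisymm hle (by omega)
      subst this
      exact ⟨le_refl _, hlo, hhi⟩

-- characterisation of A's loop: if j satisfies the bracketing condition, the loop appends
-- exactly j further elements 2(k+1), …, 2(k+j) and leaves the corresponding remainder.
theorem pvLoopA_spec (j : Nat) : ∀ (s : Int) (k : Nat),
    (j : Int) * (2 * k + j + 1) ≤ s → s < ((j : Int) + 1) * (2 * (k : Int) + j + 2) →
    pvLoopA s k = ((List.range j).map (fun i : Nat => 2 * ((k : Int) + 1 + (i : Int))),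
                   s - (j : Int) * (2 * (k : Int) + j + 1)) := by
  induction j with
  | zero =>
      intro s k h1 h2
      rw [pvLoopA, dif_neg (by push_cast at h1 h2 ⊢; omega)]
      simp
  | succ j ih =>
      intro s k h1 h2
      have hge : 2 * ((k : Int) + 1) ≤ s := by push_cast at h1; nlinarith
      rw [pvLoopA, dif_pos hge]
      have h1' : (j : Int) * (2 * ((k + 1 : Nat) : Int) + j + 1) ≤ s - 2 * ((k : Int) + 1) := by
        push_cast at h1 ⊢; nlinarith
      have h2' : s - 2 * ((k : Int) + 1) < ((j : Int) + 1) * (2 * ((k + 1 : Nat) : Int) + j + 2) := by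
        push_cast at h2 ⊢; nlinarith
      rw [ih (s - 2 * ((k : Int) + 1)) (k + 1) h1' h2']
      dsimp only
      simp only [Prod.mk.injEq]
      constructor
      · rw [List.range_succ_eq_map, List.map_cons, List.map_map]
        congr 1
        apply List.map_congr_left; intro i _; simp [Function.comp]; ring
      · push_cast; ring

-- specialisation to A's initial state k = 0
theorem pvLoopA_zero (j : Nat) (s : Int) (h1 : (j : Int) * ((j : Int) + 1) ≤ s)
    (h2 : s < ((j : Int) + 1) * ((j : Int) + 2)) :
    pvLoopA s 0 = ((List.range j).map (fun i : Nat => 2 * ((i : Int) + 1)),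
                   s - (j : Int) * ((j : Int) + 1)) := by
  rw [pvLoopA_spec j s 0 (by push_cast; nlinarith) (by push_cast; nlinarith)]
  simp only [Prod.mk.injEq]
  constructor
  · apply List.map_congr_left; intro i _; push_cast; ring
  · push_cast; ring

theorem pvBumpLast_append (xs : List Int) (x r : Int) :
    pvBumpLast (xs ++ [x]) r = xs ++ [x + r] := by
  induction xs with
  | nil => rfl
  | cons a as ih =>
      cases as with
      | nil => simp [pvBumpLast]
      | cons b bs => simpa [pvBumpLast] using ih

-- B's [2*i for i in range(1, m)] in terms of List.range
theorem pvRange_eq (m : Int) (hm : 1 ≤ m) :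
    (PySem.List.pyRange 1 m 1).map (fun i => 2 * i)
      = (List.range (m.toNat - 1)).map (fun i : Nat => 2 * ((i : Int) + 1)) := by
  rw [PySem.List.pyRange_one, List.map_map]
  have h : (m - 1).toNat = m.toNat - 1 := by omega
  rw [h]
  apply List.map_congr_left; intro i _; simp [Function.comp]; ring

theorem maximumEvenSplit_eq (finalSum : Int) :
    maximumEvenSplit finalSum = maximumEvenSplit_alt finalSum := by
  unfold maximumEvenSplit maximumEvenSplit_alt
  by_cases hodd : PySem.Int.mod finalSum 2 ≠ 0
  · rw [if_pos hodd, if_pos (Or.inl hodd)]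
  · rw [if_neg hodd]
    have hmod : PySem.Int.mod finalSum 2 = 0 := not_not.mp hodd
    have heven : finalSum % 2 = 0 := by
      rw [← PySem.Int.mod_eq_emod_of_pos (show (0:Int) < 2 by norm_num)]; exact hmod
    by_cases hsmall : finalSum < 2
    · rw [if_pos (Or.inr hsmall)]
      rw [pvLoopA, dif_neg (by norm_num; omega)]
      dsimp only
      rw [if_neg (by omega)]
    · rw [if_neg (not_or.mpr ⟨hodd, hsmall⟩)]
      rw [not_lt] at hsmall
      obtain ⟨hlom, hm1, hm2⟩ := pvBsearch_spec finalSum 1 finalSum (by omega) (by omega) (by nlinarith)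
      set m := pvBsearch finalSum 1 finalSum with hmdef
      have hmnat : (m.toNat : Int) = m := by omega
      have hloop := pvLoopA_zero m.toNat finalSum (by rw [hmnat]; exact hm1) (by rw [hmnat]; omega)
      rw [hloop]
      dsimp only
      rw [hmnat]
      rw [pvRange_eq m (by omega)]
      have hn : m.toNat = (m.toNat - 1) + 1 := by omega
      have hsplit : (List.range m.toNat).map (fun i : Nat => 2 * ((i : Int) + 1))
          = (List.range (m.toNat - 1)).map (fun i : Nat => 2 * ((i : Int) + 1)) ++ [2 * m] := by
        conv_lhs => rw [hn]
        rw [List.range_succ, List.map_append, List.map_singleton]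
        congr 2
        omega
      by_cases hr : finalSum - m * (m + 1) > 0
      · rw [if_pos hr, hsplit, pvBumpLast_append]
        congr 2
        ring
      · rw [if_neg hr, hsplit]
        have hfs : finalSum = m * (m + 1) := le_antisymm (by omega) hm1
        congr 1
        congr 1
        rw [hfs]; ring

-- ===== VERDICT (by name: the statement is the Claim_ definition above) =====
theorem maximumEvenSplit_spec : Claim_equal_maximumEvenSplit := by
  intro finalSum _
  unfold Spec_maximumEvenSplit
  exact maximumEvenSplit_eq finalSum
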